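-- pv_equiv track=rewrite | github.com/MiiRaGe/scrabble_solver | parrallellize.py | generate_scores_combo
-- ===== SOURCE A (Python) =====
-- import copy
--
-- MAX_SCORES = {
--     16: 2,
--     18: 1,
--     22: 1,
--     20: 1,
--     40: 1,
-- }
--
-- SCORES_ALTERNATIVE = {
--     '8th': [16, 22, 40, 18, 20],
--     '9th': [16, 22],
--     '10th': [16, 40],
--     '15th': [16, 18],
--     '16th': [18, 20],
--     '17th': [16, 22, 40, 18, 20],
-- }
--
-- SCORES_ALTERNATIVE_VARIANT = {
--     '8th': [16, 18, 20],
--     '9th': [16, 22],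
--     '10th': [16, 40],
--     '15th': [16, 22, 40],
--     '16th': [16, 18, 20],
--     '17th': [16, 18, 20],
-- }
--
-- RANKS = ['8th', '9th', '10th', '15th', '16th', '17th']
--
-- def generate_scores_combo(variant):
--     combo_list = [
--         {
--             'scores': {},
--             'max_scores': copy.copy(MAX_SCORES),
--         }
--     ]
--     for rank in RANKS:
--         alternatives = SCORES_ALTERNATIVE[rank]
--         if variant['2'] == 1:
--             alternatives = SCORES_ALTERNATIVE_VARIANT[rank]
--         new_combo_list = []
--         for combo in combo_list:
--             max_scores = combo['max_scores']
--             for score in alternatives: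
--                 if max_scores[score] == 0:
--                     continue
--                 if rank == '10th':
--                     if score == combo['scores']['9th']:
--                         continue
--                 if variant['2'] == 1:
--                     if rank == '15th':
--                         if score == combo['scores']['9th'] or score == combo['scores']['10th']:
--                             continue
--                     elif rank == '16th':
--                         if score == combo['scores']['8th']:
--                             continue
--                     elif rank == '17th':
--                         if score == combo['scores']['8th'] or score == combo['scores']['16th']:
--                             continue
--                 else:
--                     if rank == '16th':
--                         if score == combo['scores']['15th']:
--                             continue
--                 new_combo = copy.deepcopy(combo)
--                 new_combo['max_scores'][score] -= 1
--                 new_combo['scores'][rank] = score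
--                 new_combo_list.append(new_combo)
--         combo_list = new_combo_list
--     return [x['scores'] for x in combo_list]
-- ===== SOURCE B (Python) =====
-- MAX_SCORES = {
--     16: 2,
--     18: 1,
--     22: 1,
--     20: 1,
--     40: 1,
-- }
--
-- SCORES_ALTERNATIVE = {
--     '8th': [16, 22, 40, 18, 20],
--     '9th': [16, 22],
--     '10th': [16, 40],
--     '15th': [16, 18],
--     '16th': [18, 20],
--     '17th': [16, 22, 40, 18, 20],
-- }
--
-- SCORES_ALTERNATIVE_VARIANT = {
--     '8th': [16, 18, 20],
--     '9th': [16, 22],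
--     '10th': [16, 40],
--     '15th': [16, 22, 40],
--     '16th': [16, 18, 20],
--     '17th': [16, 18, 20],
-- }
--
-- RANKS = ['8th', '9th', '10th', '15th', '16th', '17th']
--
--
-- def generate_scores_combo(variant):
--     # Depth-first backtracking over ranks instead of breadth-first level lists.
--     is_variant = variant['2'] == 1
--     alt_table = SCORES_ALTERNATIVE_VARIANT if is_variant else SCORES_ALTERNATIVE
--
--     def ok(rank, score, scores):
--         if rank == '10th' and score == scores['9th']:
--             return False
--         if is_variant:
--             if rank == '15th':
--                 return score != scores['9th'] and score != scores['10th']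
--             if rank == '16th':
--                 return score != scores['8th']
--             if rank == '17th':
--                 return score != scores['8th'] and score != scores['16th']
--             return True
--         if rank == '16th':
--             return score != scores['15th']
--         return True
--
--     results = []
--     scores = {}
--     remaining = dict(MAX_SCORES)
--
--     def helper(i):
--         if i == len(RANKS):
--             results.append(dict(scores))
--             return
--         rank = RANKS[i]
--         for score in alt_table[rank]:
--             if remaining[score] > 0 and ok(rank, score, scores):
--                 scores[rank] = score
--                 remaining[score] -= 1
--                 helper(i + 1)
--                 remaining[score] += 1
--                 del scores[rank]
--
--     helper(0)
--     return results
-- ===== Notes on version B (the rewrite author's own statement) =====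
-- stated objective: alternative
-- what changed: Replaced the breadth-first level-by-level rebuilding of whole combo lists (with a deepcopy of every partial combo per extension) by depth-first recursive backtracking that mutates one shared scores/remaining pair and restores it after each branch; Pre_ excludes variants without key '2', where A raises KeyError (B raises too).
import Mathlib
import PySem

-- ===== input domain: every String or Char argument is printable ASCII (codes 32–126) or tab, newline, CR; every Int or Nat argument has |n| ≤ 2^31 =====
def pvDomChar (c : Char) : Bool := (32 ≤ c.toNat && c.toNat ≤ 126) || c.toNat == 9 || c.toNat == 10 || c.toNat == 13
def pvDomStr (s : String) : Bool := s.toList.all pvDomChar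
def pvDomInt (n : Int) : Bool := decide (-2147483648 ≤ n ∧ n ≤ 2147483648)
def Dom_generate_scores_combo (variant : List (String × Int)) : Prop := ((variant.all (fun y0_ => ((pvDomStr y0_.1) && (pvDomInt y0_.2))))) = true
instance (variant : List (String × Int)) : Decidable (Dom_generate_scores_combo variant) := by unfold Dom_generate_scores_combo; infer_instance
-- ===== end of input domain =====

-- B replaces A's breadth-first combo-list rebuilding (deepcopy per extension) by depth-first
-- recursive backtracking over the ranks; the proved equivalence is about the return value.

-- shared module constants (same module as A)
def pvMAX_SCORES : PySem.Dict Int Int :=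
  PySem.Dict.ofList [(16, 2), (18, 1), (22, 1), (20, 1), (40, 1)]

def pvSCORES_ALTERNATIVE : PySem.Dict String (List Int) :=
  PySem.Dict.ofList [("8th", [16, 22, 40, 18, 20]), ("9th", [16, 22]), ("10th", [16, 40]),
    ("15th", [16, 18]), ("16th", [18, 20]), ("17th", [16, 22, 40, 18, 20])]

def pvSCORES_ALTERNATIVE_VARIANT : PySem.Dict String (List Int) :=
  PySem.Dict.ofList [("8th", [16, 18, 20]), ("9th", [16, 22]), ("10th", [16, 40]),
    ("15th", [16, 22, 40]), ("16th", [16, 18, 20]), ("17th", [16, 18, 20])]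

def pvRANKS : List String := ["8th", "9th", "10th", "15th", "16th", "17th"]

-- ===== PORT A =====
-- a combo is the pair (scores, max_scores); `isv` is the (constant) value of `variant['2'] == 1`,
-- which Python re-reads each iteration with the same result (Pre_ guarantees the key exists).
-- The inner `continue` chain is transliterated as nested ifs that skip the append.
def pvAStep (isv : Bool) (combo_list : List (PySem.Dict String Int × PySem.Dict Int Int))
    (rank : String) : List (PySem.Dict String Int × PySem.Dict Int Int) :=
  let alternatives :=
    if isv then pvSCORES_ALTERNATIVE_VARIANT.getD rank []
    else pvSCORES_ALTERNATIVE.getD rank []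
  combo_list.foldl (fun new_combo_list combo =>
    let max_scores := combo.2
    alternatives.foldl (fun acc score =>
      if max_scores.getD score 0 == 0 then acc
      else if rank == "10th" && score == combo.1.getD "9th" 0 then acc
      else if isv &&
          ((rank == "15th" && (score == combo.1.getD "9th" 0 || score == combo.1.getD "10th" 0)) ||
           (rank == "16th" && score == combo.1.getD "8th" 0) ||
           (rank == "17th" && (score == combo.1.getD "8th" 0 || score == combo.1.getD "16th" 0))) then acc
      else if !isv && (rank == "16th" && score == combo.1.getD "15th" 0) then acc
      else acc ++ [(combo.1.insert rank score, combo.2.modify score 0 (· - 1))])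
      new_combo_list) []

def generate_scores_combo (variant : List (String × Int)) : List (List (String × Int)) :=
  let combo_list : List (PySem.Dict String Int × PySem.Dict Int Int) :=
    [(PySem.Dict.empty, pvMAX_SCORES)]
  ((pvRANKS.foldl (pvAStep ((PySem.Dict.mk variant).getD "2" 0 == 1)) combo_list).map
    (fun x => x.1.items))

-- ===== PORT B =====
def pvBOk (isv : Bool) (scores : PySem.Dict String Int) (rank : String) (score : Int) : Bool :=
  if rank == "10th" && score == scores.getD "9th" 0 then false
  else if isv then
    if rank == "15th" then score != scores.getD "9th" 0 && score != scores.getD "10th" 0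
    else if rank == "16th" then score != scores.getD "8th" 0
    else if rank == "17th" then score != scores.getD "8th" 0 && score != scores.getD "16th" 0
    else true
  else if rank == "16th" then score != scores.getD "15th" 0
  else true

-- the for-loop over the rank's alternatives: `child` is the recursive descent into the next rank
def pvBLoop (guard : Int → Bool) (child : Int → List (List (String × Int))) :
    List Int → List (List (String × Int))
  | [] => []
  | score :: more => (if guard score then child score else []) ++ pvBLoop guard child more

def pvBHelper (isv : Bool) : List String → PySem.Dict String Int → PySem.Dict Int Int →
    List (List (String × Int))
  | [], scores, _ => [scores.items]
  | rank :: rest, scores, remaining =>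
    pvBLoop
      (fun score => remaining.getD score 0 > 0 && pvBOk isv scores rank score)
      (fun score => pvBHelper isv rest (scores.insert rank score) (remaining.modify score 0 (· - 1)))
      ((if isv then pvSCORES_ALTERNATIVE_VARIANT else pvSCORES_ALTERNATIVE).getD rank [])

def generate_scores_combo_alt (variant : List (String × Int)) : List (List (String × Int)) :=
  pvBHelper ((PySem.Dict.mk variant).getD "2" 0 == 1) pvRANKS PySem.Dict.empty pvMAX_SCORES

-- ===== PRECONDITION & SPEC =====
-- Pre_ excludes only variants without the key '2', on which A raises KeyError.
def Pre_generate_scores_combo (variant : List (String × Int)) : Prop :=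
  "2" ∈ variant.map Prod.fst
instance (variant : List (String × Int)) : Decidable (Pre_generate_scores_combo variant) := by
  unfold Pre_generate_scores_combo; infer_instance
def pvWitness_generate_scores_combo : (List (String × Int)) := [("2", 1)]

def Spec_generate_scores_combo (variant : List (String × Int)) (out : List (List (String × Int))) : Prop := out = generate_scores_combo_alt variant
instance (variant : List (String × Int)) (out : List (List (String × Int))) : Decidable (Spec_generate_scores_combo variant out) := by unfold Spec_generate_scores_combo; infer_instance

-- ===== CLAIM (what is proved, stated in full; the proofs are below) =====
def Claim_equal_generate_scores_combo : Prop := ∀ (variant : List (String × Int)), Dom_generate_scores_combo variant → Pre_generate_scores_combo variant → Spec_generate_scores_combo variant (generate_scores_combo variant)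

-- ===== LEMMAS AND PROOFS =====
theorem pv_core_true :
    (pvRANKS.foldl (pvAStep true) [(PySem.Dict.empty, pvMAX_SCORES)]).map (fun x => x.1.items)
      = pvBHelper true pvRANKS PySem.Dict.empty pvMAX_SCORES := by decide

theorem pv_core_false :
    (pvRANKS.foldl (pvAStep false) [(PySem.Dict.empty, pvMAX_SCORES)]).map (fun x => x.1.items)
      = pvBHelper false pvRANKS PySem.Dict.empty pvMAX_SCORES := by decide

-- ===== VERDICT (by name: the statement is the Claim_ definition above) =====
theorem generate_scores_combo_spec : Claim_equal_generate_scores_combo := by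
  intro variant _ _
  unfold Spec_generate_scores_combo generate_scores_combo generate_scores_combo_alt
  cases h : ((PySem.Dict.mk variant).getD "2" 0 == 1)
  · exact pv_core_false
  · exact pv_core_true
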